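-- pv_equiv track=rewrite | github.com/sutd-automated-programming-tools/clara-s | tests/data/midterm/midterm/2018006/Q6/submission_1/q6_work.py | get_stationline
-- ===== SOURCE A (Python) =====
-- def get_stationline(mrt):
--     dict_station = {}
--     for key,value in mrt:
--         for i in range(len(value)):
--             if value[i] not in dict_station:
--                 dict_station[value[i]] = key
--             else:
--                 dict_station[value[i]] += key
--     return dict_station
-- ===== SOURCE B (Python) =====
-- def get_stationline(mrt):
--     # Pass 1: collect stations in order of first appearance.
--     order = []
--     seen = set()
--     for key, value in mrt:
--         for station in value:
--             if station not in seen: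
--                 seen.add(station)
--                 order.append(station)
--     # Pass 2: for each station, rescan mrt and concatenate each key
--     # repeated by the number of occurrences of the station in its list.
--     return {station: ''.join(key * value.count(station) for key, value in mrt)
--             for station in order}
-- ===== Notes on version B (the rewrite author's own statement) =====
-- stated objective: alternative
-- what changed: A builds the result in one pass with string += per occurrence; B first collects the stations in first-appearance order, then for each station rescans mrt and builds its line string as a join of key*count(station) per entry.
import Mathlib
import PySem

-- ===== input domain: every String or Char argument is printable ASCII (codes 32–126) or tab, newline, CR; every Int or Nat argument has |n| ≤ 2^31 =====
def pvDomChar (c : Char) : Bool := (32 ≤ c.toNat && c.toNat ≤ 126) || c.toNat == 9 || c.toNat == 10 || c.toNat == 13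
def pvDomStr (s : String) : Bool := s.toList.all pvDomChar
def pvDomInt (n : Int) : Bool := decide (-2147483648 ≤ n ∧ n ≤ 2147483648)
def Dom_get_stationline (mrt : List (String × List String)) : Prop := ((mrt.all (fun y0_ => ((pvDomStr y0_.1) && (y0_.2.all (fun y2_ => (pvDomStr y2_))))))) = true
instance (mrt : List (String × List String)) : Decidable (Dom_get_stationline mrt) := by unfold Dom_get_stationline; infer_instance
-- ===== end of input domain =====

-- B replaces A's single += accumulation pass by two passes: collect stations in
-- first-appearance order, then per station rescan mrt joining key * count(station);
-- alternative decomposition, not claimed faster.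

-- ===== PORT A =====
def get_stationline (mrt : List (String × List String)) : List (String × String) :=
  (mrt.foldl
    (fun (d : PySem.Dict String String) kv =>
      (PySem.List.pyRange 0 (PySem.List.len kv.2) 1).foldl
        (fun d i =>
          if d.contains (PySem.List.pyGetD kv.2 i "") = false then
            d.insert (PySem.List.pyGetD kv.2 i "") kv.1
          else
            d.insert (PySem.List.pyGetD kv.2 i "") (d.getD (PySem.List.pyGetD kv.2 i "") "" ++ kv.1))
        d)
    PySem.Dict.empty).items

-- ===== PORT B =====
-- pass 1 of Source B: 'for key,value in mrt: for station in value: if station not in seen: …'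
def collectOrder (mrt : List (String × List String)) : List String :=
  (mrt.foldl
    (fun (acc : PySem.Set String × List String) kv =>
      kv.2.foldl
        (fun acc station =>
          if acc.1.contains station = false then (acc.1.add station, acc.2 ++ [station])
          else acc)
        acc)
    (PySem.Set.empty, [])).2

-- pass 2 of Source B: {station: ''.join(key * value.count(station) for key, value in mrt) …}
-- 'key * n' (string repetition) is ported exactly as PySem.List.pyRepeat on the code points.
def get_stationline_alt (mrt : List (String × List String)) : List (String × String) :=
  (collectOrder mrt).map (fun station =>
    (station,
      PySem.Str.join ""
        (mrt.map (fun kv =>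
          String.ofList (PySem.List.pyRepeat kv.1.toList ((PySem.List.count kv.2 station : Nat) : Int))))))

-- ===== PRECONDITION & SPEC =====
def Spec_get_stationline (mrt : List (String × List String)) (out : List (String × String)) : Prop := out = get_stationline_alt mrt
instance (mrt : List (String × List String)) (out : List (String × String)) : Decidable (Spec_get_stationline mrt out) := by unfold Spec_get_stationline; infer_instance

-- ===== CLAIM (what is proved, stated in full; the proofs are below) =====
def Claim_equal_get_stationline : Prop := ∀ (mrt : List (String × List String)), Dom_get_stationline mrt → Spec_get_stationline mrt (get_stationline mrt)

-- ===== LEMMAS AND PROOFS =====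

-- A's loop body on one flattened (station, key) pair
def stepA (d : PySem.Dict String String) (p : String × String) : PySem.Dict String String :=
  if d.contains p.1 = false then d.insert p.1 p.2
  else d.insert p.1 (d.getD p.1 "" ++ p.2)

-- the flattened (station, key) pairs A iterates over
def pairsOf (mrt : List (String × List String)) : List (String × String) :=
  mrt.flatMap (fun kv => kv.2.map (fun st => (st, kv.1)))

-- concatenation of the keys of all pairs whose station is s, in order
def cat : List (String × String) → String → String
  | [], _ => ""
  | (t, k) :: r, s => if t == s then k ++ cat r s else cat r s

-- first-occurrence dedup of l relative to the already-seen list K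
def dednew (K : List String) : List String → List String
  | [] => []
  | s :: t => if PySem.Set.contains K s then dednew K t else s :: dednew (K ++ [s]) t

-- the new-stations tail A's fold appends, given already-present keys K
def news (K : List String) : List (String × String) → List (String × String)
  | [] => []
  | (s, k) :: r =>
      if PySem.Set.contains K s then news K r
      else (s, k ++ cat r s) :: news (K ++ [s]) r

theorem contains_iff_mem_str (K : List String) (s : String) :
    PySem.Set.contains K s = true ↔ s ∈ K := by
  simp [PySem.Set.contains]

theorem mem_dednew (t : List String) (K : List String) (x : String)
    (h : x ∈ dednew K t) : x ∉ K := by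
  induction t generalizing K with
  | nil => simp [dednew] at h
  | cons s r ih =>
    by_cases hm : s ∈ K
    · have hc : PySem.Set.contains K s = true := (contains_iff_mem_str K s).mpr hm
      exact ih K (by rw [dednew, if_pos hc] at h; exact h)
    · have hc : PySem.Set.contains K s = false := by
        simpa using fun hh => hm ((contains_iff_mem_str K s).mp hh)
      rw [dednew, if_neg (by rw [hc]; exact Bool.false_ne_true)] at h
      rcases List.mem_cons.mp h with rfl | h'
      · exact hm
      · intro hx; exact (ih (K ++ [s]) h') (List.mem_append_left _ hx)

theorem news_eq_map_dednew (l : List (String × String)) (K : List String) :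
    news K l = (dednew K (l.map Prod.fst)).map (fun s => (s, cat l s)) := by
  induction l generalizing K with
  | nil => rfl
  | cons p r ih =>
    obtain ⟨s, k⟩ := p
    by_cases hm : s ∈ K
    · have hc : PySem.Set.contains K s = true := (contains_iff_mem_str K s).mpr hm
      rw [show news K ((s, k) :: r) = news K r from by rw [news, if_pos hc],
        show dednew K (((s, k) :: r).map Prod.fst) = dednew K (r.map Prod.fst) from by
          rw [List.map_cons]; rw [dednew, if_pos hc], ih K]
      apply List.map_congr_left
      intro x hx
      have hxs : (x == s) = false := by
        simp only [beq_eq_false_iff_ne, ne_eq]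
        intro h; exact (mem_dednew _ _ _ hx) (by rw [h]; exact hm)
      have hsx : ¬ s = x := fun h => by simp [h] at hxs
      simp [cat, hsx]
    · have hc : PySem.Set.contains K s = false := by
        simpa using fun hh => hm ((contains_iff_mem_str K s).mp hh)
      rw [show news K ((s, k) :: r) = (s, k ++ cat r s) :: news (K ++ [s]) r from by
          rw [news, if_neg (by rw [hc]; exact Bool.false_ne_true)],
        show dednew K (((s, k) :: r).map Prod.fst) = s :: dednew (K ++ [s]) (r.map Prod.fst)
          from by rw [List.map_cons]; rw [dednew, if_neg (by rw [hc]; exact Bool.false_ne_true)], ih (K ++ [s])]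
      simp only [List.map_cons, cat, beq_self_eq_true, if_true]
      congr 1
      apply List.map_congr_left
      intro x hx
      have hxs : (x == s) = false := by
        simp only [beq_eq_false_iff_ne, ne_eq]
        intro h
        exact (mem_dednew _ _ _ hx) (List.mem_append_right _ (by simp [h]))
      have hsx : ¬ s = x := fun h => by simp [h] at hxs
      simp [cat, hsx]

-- A's fold over the flattened pairs, characterised
theorem foldA_items (l : List (String × String)) (d : PySem.Dict String String)
    (hnd : d.keys.Nodup) :
    (l.foldl stepA d).items
      = d.items.map (fun q => (q.1, q.2 ++ cat l q.1)) ++ news d.keys l := by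
  induction l generalizing d with
  | nil =>
    simp only [List.foldl_nil, news, cat, String.append_empty, List.append_nil]
    exact (List.map_id d.items).symm ▸ (by simp)
  | cons p r ih =>
    obtain ⟨s, k⟩ := p
    by_cases hc : d.contains s = true
    · have hKs : PySem.Set.contains d.keys s = true := by
        simpa [PySem.Set.contains, contains_iff_mem_str] using
          (PySem.Dict.contains_iff_mem_keys (d := d) (k := s)).mp hc
      have hstep : stepA d (s, k) = d.insert s (d.getD s "" ++ k) := by
        simp [stepA, hc]
      have hkeys : (stepA d (s, k)).keys = d.keys := by
        rw [hstep]; exact PySem.Dict.keys_insert_of_contains d _ hc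
      have hitems : (stepA d (s, k)).items
          = d.items.map (fun q => if (q.1 == s) = true then (s, d.getD s "" ++ k) else q) := by
        rw [hstep]; exact PySem.Dict.items_insert_of_contains d _ hc
      rw [List.foldl_cons, ih (stepA d (s, k)) (hkeys ▸ hnd), hkeys, hitems, List.map_map,
        show news d.keys ((s, k) :: r) = news d.keys r from by rw [news, if_pos hKs]]
      congr 1
      apply List.map_congr_left
      intro q hq
      obtain ⟨q1, q2⟩ := q
      by_cases hqs : q1 = s
      · subst hqs
        have hgd : d.getD q1 "" = q2 := PySem.Dict.getD_of_mem_items d hq hnd ""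
        simp [Function.comp, cat, hgd, String.append_assoc]
      · have hb : (q1 == s) = false := by simpa using hqs
        simp [Function.comp, cat, hb, Ne.symm hqs]
    · have hc' : d.contains s = false := by simpa using hc
      have hsnk : s ∉ d.keys := fun h =>
        hc ((PySem.Dict.contains_iff_mem_keys (d := d) (k := s)).mpr h)
      have hKs : PySem.Set.contains d.keys s = false := by
        simpa [contains_iff_mem_str] using hsnk
      have hstep : stepA d (s, k) = d.insert s k := by simp [stepA, hc']
      have hkeys : (stepA d (s, k)).keys = d.keys ++ [s] := by
        rw [hstep]; exact PySem.Dict.keys_insert_of_not_contains d _ hc'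
      have hitems : (stepA d (s, k)).items = d.items ++ [(s, k)] := by
        rw [hstep]; exact PySem.Dict.items_insert_of_not_contains d _ hc'
      have hnd' : (stepA d (s, k)).keys.Nodup := by
        rw [hkeys]
        exact List.nodup_append.mpr ⟨hnd, List.nodup_singleton s, by intro a ha b hb h; rw [List.mem_singleton] at hb; exact hsnk (hb ▸ h ▸ ha)⟩
      rw [List.foldl_cons, ih (stepA d (s, k)) hnd', hkeys, hitems,
        show news d.keys ((s, k) :: r) = (s, k ++ cat r s) :: news (d.keys ++ [s]) r from by
          rw [news, if_neg (by rw [hKs]; exact Bool.false_ne_true)]]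
      simp only [List.map_append, List.map_cons, List.map_nil, cat, beq_self_eq_true, if_true,
        List.append_assoc, List.singleton_append]
      congr 1
      apply List.map_congr_left
      intro q hq
      obtain ⟨q1, q2⟩ := q
      have hqs : q1 ≠ s := fun h =>
        hsnk (h ▸ List.mem_map_of_mem (f := Prod.fst) hq)
      have hb : (q1 == s) = false := by simpa using hqs
      simp [Ne.symm hqs]

-- A's port IS the fold of stepA over the flattened pairs
theorem get_stationline_eq_fold (mrt : List (String × List String)) :
    get_stationline mrt = ((pairsOf mrt).foldl stepA PySem.Dict.empty).items := by
  unfold get_stationline pairsOf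
  rw [List.foldl_flatMap]
  congr 1
  apply PySem.List.foldl_congr_mem
  intro d kv _
  rw [List.foldl_map]
  exact PySem.List.foldl_pyRange_zero_pyGetD kv.2 "" (fun d s => stepA d (s, kv.1)) d

-- ''.join with empty separator is flatten
theorem chars_join_nil (xs : List (List Char)) :
    PySem.Chars.join [] xs = xs.flatten := by
  simp only [PySem.Chars.join, List.intercalate]
  induction xs with
  | nil => rfl
  | cons a t ih =>
    cases t with
    | nil => rfl
    | cons b t' =>
      simp only [List.intersperse_cons₂, List.flatten_cons] at *
      simp [ih]

-- one entry's contribution to station s is key * count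
theorem cat_seg (v : List String) (k s : String) :
    cat (v.map (fun st => (st, k))) s
      = String.ofList (PySem.List.pyRepeat k.toList ((PySem.List.count v s : Nat) : Int)) := by
  induction v with
  | nil =>
    show ("" : String) = String.ofList (PySem.List.pyRepeat k.toList ((List.count s [] : Nat) : Int))
    rfl
  | cons st t ih =>
    by_cases h : st = s
    · subst h
      apply String.toList_injective
      simp only [List.map_cons, cat, beq_self_eq_true, if_true, String.toList_append, ih]
      simp [PySem.List.pyRepeat, PySem.List.count, List.replicate_succ, String.toList_ofList]
    · have hb : (st == s) = false := by simpa using h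
      simp only [List.map_cons, cat, hb, Bool.false_eq_true, if_false, ih]
      congr 2
      simp [PySem.List.count, List.count_cons, hb]

-- cat distributes over append of pair lists
theorem cat_append (a b : List (String × String)) (s : String) :
    cat (a ++ b) s = cat a s ++ cat b s := by
  induction a with
  | nil => simp [cat, String.empty_append]
  | cons p r ih =>
    obtain ⟨t, k⟩ := p
    by_cases h : (t == s) = true
    · simp [cat, h, ih, String.append_assoc]
    · simp [cat, h, ih]

-- B's per-station string is cat over the flattened pairs
theorem join_eq_cat (mrt : List (String × List String)) (s : String) :
    PySem.Str.join ""
        (mrt.map (fun kv =>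
          String.ofList (PySem.List.pyRepeat kv.1.toList ((PySem.List.count kv.2 s : Nat) : Int))))
      = cat (pairsOf mrt) s := by
  apply String.toList_injective
  rw [PySem.Str.toList_join]
  simp only [show ("" : String).toList = [] from rfl, chars_join_nil, List.map_map]
  induction mrt with
  | nil => simp [pairsOf, cat]
  | cons kv rest ih =>
    simp only [List.map_cons, List.flatten_cons, pairsOf, List.flatMap_cons, cat_append,
      String.toList_append]
    rw [show (pairsOf rest) = rest.flatMap (fun kv => kv.2.map (fun st => (st, kv.1))) from rfl]
      at ih
    rw [ih]
    congr 1
    have := cat_seg kv.2 kv.1 s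
    calc (String.ofList (PySem.List.pyRepeat kv.1.toList ((PySem.List.count kv.2 s : Nat) : Int))).toList
        = (cat (kv.2.map fun st => (st, kv.1)) s).toList := by rw [this]
      _ = _ := rfl

-- dednew over an appended list
theorem dednew_append (a b : List String) (K : List String) :
    dednew K (a ++ b) = dednew K a ++ dednew (K ++ dednew K a) b := by
  induction a generalizing K with
  | nil => simp [dednew]
  | cons s t ih =>
    rw [List.cons_append]
    by_cases h : PySem.Set.contains K s = true
    · rw [dednew, if_pos h, show dednew K (s :: t) = dednew K t from by rw [dednew, if_pos h],
        ih]
    · have h' : ¬ (PySem.Set.contains K s = true) := h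
      rw [dednew, if_neg h', show dednew K (s :: t) = s :: dednew (K ++ [s]) t from by
          rw [dednew, if_neg h'],
        ih (K ++ [s])]
      simp [List.append_assoc]

-- the inner Python loop of pass 1, characterised
theorem inner_collect (stations : List String) (K : PySem.Set String) (ord : List String) :
    stations.foldl
        (fun (acc : PySem.Set String × List String) station =>
          if acc.1.contains station = false then (acc.1.add station, acc.2 ++ [station])
          else acc)
        (K, ord)
      = (K ++ dednew K stations, ord ++ dednew K stations) := by
  induction stations generalizing K ord with
  | nil => simp [dednew]
  | cons s t ih =>
    rw [List.foldl_cons]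
    by_cases h : PySem.Set.contains K s = true
    · rw [show (if (PySem.Set.contains K s) = false
            then ((PySem.Set.add K s, ord ++ [s]) : PySem.Set String × List String)
            else (K, ord)) = (K, ord) from by rw [h]; rfl,
        ih K ord, dednew, if_pos h]
    · have hf : PySem.Set.contains K s = false := by simpa using h
      have hadd : PySem.Set.add K s = K ++ [s] := by
        rw [PySem.Set.add, if_neg (by rw [hf]; exact Bool.false_ne_true)]
      rw [show (if (PySem.Set.contains K s) = false
            then ((PySem.Set.add K s, ord ++ [s]) : PySem.Set String × List String)
            else (K, ord)) = (K ++ [s], ord ++ [s]) from by rw [hf, hadd]; rfl,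
        ih (K ++ [s]) (ord ++ [s]), dednew, if_neg h]
      simp [List.append_assoc]

-- pass 1 collects first occurrences of the flattened stations
theorem collectOrder_eq_dednew (mrt : List (String × List String)) :
    collectOrder mrt = dednew [] ((pairsOf mrt).map Prod.fst) := by
  have key : ∀ (l : List (String × List String)) (K : PySem.Set String) (ord : List String),
      l.foldl
          (fun (acc : PySem.Set String × List String) kv =>
            kv.2.foldl
              (fun acc station =>
                if acc.1.contains station = false then (acc.1.add station, acc.2 ++ [station])
                else acc)
              acc)
          (K, ord)
        = (K ++ dednew K (l.flatMap (·.2)), ord ++ dednew K (l.flatMap (·.2))) := by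
    intro l
    induction l with
    | nil => intro K ord; simp [dednew]
    | cons kv rest ih =>
      intro K ord
      rw [List.foldl_cons, inner_collect, ih, List.flatMap_cons, dednew_append]
      simp [List.append_assoc]
  have hfst : (pairsOf mrt).map Prod.fst = mrt.flatMap (·.2) := by
    simp [pairsOf, List.map_flatMap, List.map_map, Function.comp_def]
  rw [collectOrder, key mrt PySem.Set.empty [], hfst]
  rfl

-- ===== VERDICT (by name: the statement is the Claim_ definition above) =====
theorem get_stationline_spec : Claim_equal_get_stationline := by
  intro mrt _
  unfold Spec_get_stationline
  rw [get_stationline_eq_fold,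
    foldA_items (pairsOf mrt) PySem.Dict.empty PySem.Dict.nodup_keys_empty]
  have hempty : (PySem.Dict.empty : PySem.Dict String String).items = [] := rfl
  have hkeys : (PySem.Dict.empty : PySem.Dict String String).keys = [] := rfl
  rw [hempty, hkeys, List.map_nil, List.nil_append, news_eq_map_dednew]
  unfold get_stationline_alt
  rw [collectOrder_eq_dednew]
  apply List.map_congr_left
  intro s _
  rw [join_eq_cat]
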